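-- pv_equiv track=rewrite | github.com/labhacker007/PurpleLab | backend/detection/parsers/kql_parser.py | _split_on_logic_op
-- ===== SOURCE A (Python) =====
-- def _split_on_logic_op(expr: str, op: str) -> list[str]:
--     """Split expression on a logical operator, respecting parens and quotes.
--
--     Args:
--         expr: Expression string.
--         op: "and" or "or".
--
--     Returns:
--         List of expression parts.
--     """
--     parts: list[str] = []
--     current: list[str] = []
--     depth = 0
--     in_quote: str | None = None
--     tokens = expr.split()
--     i = 0
--
--     while i < len(tokens):
--         token = tokens[i]
--
--         # Track quotes
--         for ch in token:
--             if ch in ('"', "'") and in_quote is None: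
--                 in_quote = ch
--             elif ch == in_quote:
--                 in_quote = None
--
--         # Track parentheses
--         depth += token.count("(") - token.count(")")
--
--         if (in_quote is None and depth == 0
--                 and token.lower() == op):
--             if current:
--                 parts.append(" ".join(current))
--                 current = []
--         else:
--             current.append(token)
--         i += 1
--
--     if current:
--         parts.append(" ".join(current))
--
--     return parts if parts else [expr]
-- ===== SOURCE B (Python) =====
-- def _split_on_logic_op(expr: str, op: str) -> list[str]:
--     """Split expression on a logical operator, respecting parens and quotes.
--
--     Two-pass decomposition: first annotate every token with whether it is a
--     top-level separator (quote state and paren depth tracked per token), then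
--     recursively cut the annotated token list at the separators, joining each
--     non-empty run.
--     """
--     tokens = expr.split()
--
--     def step(state, tok):
--         depth, q = state
--         for ch in tok:
--             if ch in ('"', "'") and q is None:
--                 q = ch
--             elif ch == q:
--                 q = None
--         depth += tok.count("(") - tok.count(")")
--         return (depth, q), (q is None and depth == 0 and tok.lower() == op)
--
--     flagged = []
--     state = (0, None)
--     for tok in tokens:
--         state, is_sep = step(state, tok)
--         flagged.append((tok, is_sep))
--
--     def chunks(fl):
--         if not fl:
--             return []
--         i = 0
--         while i < len(fl) and not fl[i][1]:
--             i += 1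
--         head = [tok for tok, _ in fl[:i]]
--         rest = chunks(fl[i + 1:]) if i < len(fl) else []
--         return ([" ".join(head)] if head else []) + rest
--
--     parts = chunks(flagged)
--     return parts if parts else [expr]
-- ===== Notes on version B (the rewrite author's own statement) =====
-- stated objective: alternative
-- what changed: A's single stateful loop that interleaves quote/paren tracking with accumulate-and-flush of the current part is replaced by two passes: first annotate every token with a top-level-separator flag, then recursively cut the annotated token list at the flags and join each non-empty run.
import Mathlib
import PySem

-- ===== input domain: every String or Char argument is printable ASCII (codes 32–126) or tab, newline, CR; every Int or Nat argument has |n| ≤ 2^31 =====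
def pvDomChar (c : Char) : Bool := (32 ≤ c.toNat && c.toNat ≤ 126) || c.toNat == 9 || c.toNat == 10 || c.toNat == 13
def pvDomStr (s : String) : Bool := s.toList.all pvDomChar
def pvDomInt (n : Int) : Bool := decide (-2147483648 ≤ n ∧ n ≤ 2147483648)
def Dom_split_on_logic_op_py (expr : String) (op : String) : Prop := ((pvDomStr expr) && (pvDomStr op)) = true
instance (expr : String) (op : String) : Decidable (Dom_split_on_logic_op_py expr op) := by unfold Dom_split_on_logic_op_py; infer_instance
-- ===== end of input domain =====

-- B replaces A's single stateful accumulate-and-flush loop by a two-pass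
-- decomposition (annotate each token with a top-level-separator flag, then
-- recursively cut the annotated list at the flags); objective: alternative.

-- ===== PORT A =====
-- the char-by-char quote tracking loop, shared verbatim by both Pythons
def pvQuoteStep (q : Option Char) (ch : Char) : Option Char :=
  if (ch = '"' ∨ ch = '\'') ∧ q = none then some ch
  else if some ch = q then none else q

-- token.count("(") - token.count(")")
def pvParenDelta (tok : String) : Int :=
  (PySem.Str.count tok "(" : Int) - (PySem.Str.count tok ")" : Int)

-- A's while-loop over tokens with state (parts, current, depth, in_quote),
-- including the trailing 'if current: parts.append(...)'
def pvLoopA (op : String) : List String → List String → List String → Int → Option Char → List String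
  | [], parts, current, _, _ =>
      if current ≠ [] then parts ++ [PySem.Str.join " " current] else parts
  | tok :: rest, parts, current, depth, q =>
      let q' := tok.toList.foldl pvQuoteStep q
      let d' := depth + pvParenDelta tok
      if q' = none ∧ d' = 0 ∧ PySem.Str.lower tok = op then
        pvLoopA op rest (if current ≠ [] then parts ++ [PySem.Str.join " " current] else parts) [] d' q'
      else
        pvLoopA op rest parts (current ++ [tok]) d' q'

def split_on_logic_op_py (expr : String) (op : String) : List String :=
  let parts := pvLoopA op (PySem.Str.split₀ expr) [] [] 0 none
  if parts ≠ [] then parts else [expr]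

-- ===== PORT B =====
-- Source B's step: update (depth, q) through one token, return new state and flag
def pvStepB (op : String) (st : Int × Option Char) (tok : String) : (Int × Option Char) × Bool :=
  let q := tok.toList.foldl pvQuoteStep st.2
  let d := st.1 + pvParenDelta tok
  ((d, q), decide (q = none) && decide (d = 0) && (PySem.Str.lower tok == op))

-- Source B's first pass: the flagged token list
def pvFlagged (op : String) (tokens : List String) : List (String × Bool) :=
  (tokens.foldl
    (fun (acc : (Int × Option Char) × List (String × Bool)) tok =>
      let r := pvStepB op acc.1 tok
      (r.1, acc.2 ++ [(tok, r.2)]))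
    ((0, none), [])).2

-- Source B's chunks: cut the flagged list at the first separator and recurse
def pvChunks (fl : List (String × Bool)) : List String :=
  match hfl : fl with
  | [] => []
  | _ :: _ =>
      let head := (fl.takeWhile (fun p => !p.2)).map Prod.fst
      let rest := fl.dropWhile (fun p => !p.2)
      (if head ≠ [] then [PySem.Str.join " " head] else []) ++
        (if rest = [] then [] else pvChunks rest.tail)
termination_by fl.length
decreasing_by
  rename_i hne
  rw [← hfl]
  have h1 := List.length_dropWhile_le (fun p => !p.2) fl
  have h2 : 0 < (List.dropWhile (fun p => !p.2) fl).length := List.length_pos_iff.mpr hne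
  simp only [List.length_tail]
  omega

def split_on_logic_op_py_alt (expr : String) (op : String) : List String :=
  let parts := pvChunks (pvFlagged op (PySem.Str.split₀ expr))
  if parts ≠ [] then parts else [expr]

-- ===== PRECONDITION & SPEC =====
def Spec_split_on_logic_op_py (expr : String) (op : String) (out : List String) : Prop := out = split_on_logic_op_py_alt expr op
instance (expr : String) (op : String) (out : List String) : Decidable (Spec_split_on_logic_op_py expr op out) := by unfold Spec_split_on_logic_op_py; infer_instance

-- ===== CLAIM (what is proved, stated in full; the proofs are below) =====
def Claim_equal_split_on_logic_op_py : Prop := ∀ (expr : String) (op : String), Dom_split_on_logic_op_py expr op → Spec_split_on_logic_op_py expr op (split_on_logic_op_py expr op)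

-- ===== LEMMAS AND PROOFS =====

-- the flag stream produced from an arbitrary starting state
def pvFlagFrom (op : String) : List String → Int × Option Char → List (String × Bool)
  | [], _ => []
  | tok :: rest, st =>
      let r := pvStepB op st tok
      (tok, r.2) :: pvFlagFrom op rest r.1

theorem pvFlagged_eq_from (op : String) (tokens : List String) :
    ∀ (st : Int × Option Char) (acc : List (String × Bool)),
      (tokens.foldl
        (fun (acc : (Int × Option Char) × List (String × Bool)) tok =>
          let r := pvStepB op acc.1 tok
          (r.1, acc.2 ++ [(tok, r.2)])) (st, acc)).2
      = acc ++ pvFlagFrom op tokens st := by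
  induction tokens with
  | nil => intro st acc; simp [pvFlagFrom]
  | cons tok rest ih =>
      intro st acc
      simp only [List.foldl_cons, pvFlagFrom]
      rw [ih]
      simp

-- A's loop from state (parts, current, d, q) appends the chunks of the
-- remaining flag stream, with 'current' as the pending run.
def pvChunksC (op : String) : List (String × Bool) → List String → List String
  | [], cur => if cur ≠ [] then [PySem.Str.join " " cur] else []
  | (tok, f) :: rest, cur =>
      if f then (if cur ≠ [] then [PySem.Str.join " " cur] else []) ++ pvChunksC op rest []
      else pvChunksC op rest (cur ++ [tok])

theorem pvLoopA_eq_chunksC (op : String) (tokens : List String) :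
    ∀ (parts current : List String) (d : Int) (q : Option Char),
      pvLoopA op tokens parts current d q
        = parts ++ pvChunksC op (pvFlagFrom op tokens (d, q)) current := by
  induction tokens with
  | nil => intro parts current d q; by_cases h : current = [] <;> simp [pvLoopA, pvFlagFrom, pvChunksC, h]
  | cons tok rest ih =>
      intro parts current d q
      simp only [pvLoopA, pvFlagFrom, pvChunksC, pvStepB]
      by_cases hf : (tok.toList.foldl pvQuoteStep q) = none ∧ (d + pvParenDelta tok) = 0 ∧ PySem.Str.lower tok = op
      · have hb : (decide ((tok.toList.foldl pvQuoteStep q) = none) &&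
            decide ((d + pvParenDelta tok) = 0) && (PySem.Str.lower tok == op)) = true := by
          simp [hf.1, hf.2.1, hf.2.2]
        simp only [if_pos hf, hb]
        rw [ih]
        by_cases h : current = [] <;> simp [h]
      · have hb : (decide ((tok.toList.foldl pvQuoteStep q) = none) &&
            decide ((d + pvParenDelta tok) = 0) && (PySem.Str.lower tok == op)) = false := by
          by_contra hc
          simp at hc
          exact hf hc
        simp only [if_neg hf, hb]
        rw [ih]
        simp

-- pvChunks as a takeWhile/dropWhile head split (the corollary form of the
-- generalized lemma below, used at separators)
theorem pvChunks_unfold (fl : List (String × Bool)) :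
    pvChunks fl =
      (if ((fl.takeWhile (fun p => !p.2)).map Prod.fst) ≠ [] then
        [PySem.Str.join " " ((fl.takeWhile (fun p => !p.2)).map Prod.fst)] else []) ++
      (if fl.dropWhile (fun p => !p.2) = [] then []
       else pvChunks (fl.dropWhile (fun p => !p.2)).tail) := by
  cases fl with
  | nil => simp [pvChunks]
  | cons a l => rw [pvChunks]

theorem pvChunksC_eq (op : String) (fl : List (String × Bool)) :
    ∀ (cur : List String),
      pvChunksC op fl cur =
        (if (cur ++ (fl.takeWhile (fun p => !p.2)).map Prod.fst) ≠ [] then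
          [PySem.Str.join " " (cur ++ (fl.takeWhile (fun p => !p.2)).map Prod.fst)] else []) ++
        (if fl.dropWhile (fun p => !p.2) = [] then []
         else pvChunks (fl.dropWhile (fun p => !p.2)).tail) := by
  induction fl with
  | nil => intro cur; by_cases h : cur = [] <;> simp [pvChunksC, h]
  | cons a rest ih =>
      intro cur
      obtain ⟨tok, f⟩ := a
      cases f with
      | true =>
          simp only [pvChunksC]
          rw [ih [], List.nil_append, ← pvChunks_unfold]
          simp [List.takeWhile, List.dropWhile]
      | false =>
          simp only [pvChunksC]
          rw [ih (cur ++ [tok]), List.dropWhile_cons_of_pos (by simp)]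
          simp

theorem pvChunksC_nil_eq (op : String) (fl : List (String × Bool)) :
    pvChunksC op fl [] = pvChunks fl := by
  rw [pvChunksC_eq]
  simp only [List.nil_append]
  rw [← pvChunks_unfold]

-- ===== VERDICT (by name: the statement is the Claim_ definition above) =====
theorem split_on_logic_op_py_spec : Claim_equal_split_on_logic_op_py := by
  intro expr op _
  unfold Spec_split_on_logic_op_py
  have hflag : pvFlagged op (PySem.Str.split₀ expr)
      = pvFlagFrom op (PySem.Str.split₀ expr) (0, none) := by
    unfold pvFlagged
    rw [pvFlagged_eq_from]
    simp
  have key : pvLoopA op (PySem.Str.split₀ expr) [] [] 0 none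
      = pvChunks (pvFlagged op (PySem.Str.split₀ expr)) := by
    rw [pvLoopA_eq_chunksC, hflag, pvChunksC_nil_eq, List.nil_append]
  simp [split_on_logic_op_py, split_on_logic_op_py_alt, key]
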